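-- pv_equiv track=rewrite | github.com/vkaplarevic/MyCodeEvalSolutions | cash_register.py | write_number
-- ===== SOURCE A (Python) =====
-- BILL_NAMES = {
--     1: 'PENNY',
--     5: 'NICKEL',
--     10: 'DIME',
--     25: 'QUARTER',
--     50: 'HALF DOLLAR',
--     100: 'ONE',
--     200: 'TWO',
--     500: 'FIVE',
--     1000: 'TEN',
--     2000: 'TWENTY',
--     5000: 'FIFTY',
--     10000: 'ONE HUNDRED'
-- }
--
-- BILLS = [10000, 5000, 2000, 1000, 500, 200, 100, 50, 25, 10, 5, 1]
--
-- def write_number(number):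
--     if number < 0:
--         return 'ERROR'
--     elif number == 0:
--         return 'ZERO'
--
--     result = []
--     for amount in BILLS:
--         if number == 0:
--             break
--
--         if amount > number:
--             continue
--
--         count = number // amount
--         number = number % amount
--
--         if count > 0:
--             result.append(','.join([BILL_NAMES[amount]] * count))
--
--         if number == 0:
--             break
--
--     return ','.join(result)
-- ===== SOURCE B (Python) =====
-- BILL_NAMES = {
--     1: 'PENNY',
--     5: 'NICKEL',
--     10: 'DIME',
--     25: 'QUARTER',
--     50: 'HALF DOLLAR',
--     100: 'ONE',
--     200: 'TWO',
--     500: 'FIVE',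
--     1000: 'TEN',
--     2000: 'TWENTY',
--     5000: 'FIFTY',
--     10000: 'ONE HUNDRED'
-- }
--
-- BILLS = [10000, 5000, 2000, 1000, 500, 200, 100, 50, 25, 10, 5, 1]
--
--
-- def write_number(number):
--     if number < 0:
--         return 'ERROR'
--     if number == 0:
--         return 'ZERO'
--     result = []
--     while number > 0:
--         for amount in BILLS:
--             if amount <= number:
--                 result.append(BILL_NAMES[amount])
--                 number -= amount
--                 break
--     return ','.join(result)
-- ===== Notes on version B (the rewrite author's own statement) =====
-- stated objective: alternative
-- what changed: A does one divmod pass over the 12 denominations emitting each count as a pre-joined block; B emits one bill name per iteration by repeated subtraction, rescanning BILLS top-down for the first denomination that fits, into a flat list joined once.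
import Mathlib
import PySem

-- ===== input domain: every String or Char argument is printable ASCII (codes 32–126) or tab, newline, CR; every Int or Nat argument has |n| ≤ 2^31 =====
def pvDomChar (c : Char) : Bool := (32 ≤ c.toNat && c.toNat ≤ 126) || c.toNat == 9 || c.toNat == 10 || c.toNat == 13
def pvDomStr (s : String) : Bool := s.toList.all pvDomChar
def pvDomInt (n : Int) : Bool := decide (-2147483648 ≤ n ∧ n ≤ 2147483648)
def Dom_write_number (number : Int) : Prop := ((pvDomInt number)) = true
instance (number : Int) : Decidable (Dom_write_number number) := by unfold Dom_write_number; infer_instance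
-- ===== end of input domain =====

-- B replaces A's single divmod pass over BILLS by a one-bill-at-a-time repeated-subtraction
-- loop (rescan BILLS top-down for the first fitting denomination each round): an alternative
-- decomposition, not claimed faster.

-- ===== PORT A =====
-- module-level constants shared by both Pythons
def BILL_NAMES : PySem.Dict Int String := PySem.Dict.ofList
  [(1, "PENNY"), (5, "NICKEL"), (10, "DIME"), (25, "QUARTER"), (50, "HALF DOLLAR"),
   (100, "ONE"), (200, "TWO"), (500, "FIVE"), (1000, "TEN"), (2000, "TWENTY"),
   (5000, "FIFTY"), (10000, "ONE HUNDRED")]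

def BILLS : List Int := [10000, 5000, 2000, 1000, 500, 200, 100, 50, 25, 10, 5, 1]

-- BILL_NAMES[a]; every amount looked up is a key of BILL_NAMES, so Python's KeyError cannot occur
def billName (a : Int) : String := (PySem.Dict.get? BILL_NAMES a).getD ""

-- A's for-loop over BILLS with its two breaks, state = (number, result)
def aLoop : List Int → Int → List String → List String
  | [], _, result => result
  | amount :: rest, number, result =>
    if number = 0 then result
    else if amount > number then aLoop rest number result
    else
      let count := PySem.Int.floordiv number amount
      let number' := PySem.Int.mod number amount
      let result' := if count > 0
        then result ++ [PySem.Str.join "," (List.replicate count.toNat (billName amount))]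
        else result
      if number' = 0 then result' else aLoop rest number' result'

def write_number (number : Int) : String :=
  if number < 0 then "ERROR"
  else if number = 0 then "ZERO"
  else PySem.Str.join "," (aLoop BILLS number [])

-- ===== PORT B =====
-- B's `while number > 0:` loop; the inner `for amount in BILLS: if amount <= number: … break`
-- is the first element of BILLS that fits, i.e. List.find?.  The `none` branch is unreachable
-- (1 ∈ BILLS), it only keeps the recursion total.
def bLoop (number : Int) : List String :=
  if h : 0 < number then
    match hf : BILLS.find? (fun a => decide (a ≤ number)) with
    | some amount => billName amount :: bLoop (number - amount)
    | none => []
  else []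
termination_by number.toNat
decreasing_by
  have hmem := List.mem_of_find?_eq_some hf
  have hle : amount ≤ number := by simpa using List.find?_some hf
  have hpos : 0 < amount := by
    simp only [BILLS, List.mem_cons, List.not_mem_nil, or_false] at hmem
    rcases hmem with h|h|h|h|h|h|h|h|h|h|h|h <;> omega
  omega

def write_number_alt (number : Int) : String :=
  if number < 0 then "ERROR"
  else if number = 0 then "ZERO"
  else PySem.Str.join "," (bLoop number)

-- ===== PRECONDITION & SPEC =====
def Spec_write_number (number : Int) (out : String) : Prop := out = write_number_alt number
instance (number : Int) (out : String) : Decidable (Spec_write_number number out) := by unfold Spec_write_number; infer_instance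

-- ===== CLAIM (what is proved, stated in full; the proofs are below) =====
def Claim_equal_write_number : Prop := ∀ (number : Int), Dom_write_number number → Spec_write_number number (write_number number)

-- ===== LEMMAS AND PROOFS =====

-- the flat list of bill names emitted for n by the greedy scheme, one divmod per denomination
def flat : List Int → Int → List String
  | [], _ => []
  | a :: rest, n =>
      List.replicate (PySem.Int.floordiv n a).toNat (billName a) ++ flat rest (PySem.Int.mod n a)

lemma bills_pos : ∀ a ∈ BILLS, (0:Int) < a := by decide

lemma flat_zero (bills : List Int) (h : ∀ a ∈ bills, (0:Int) < a) : flat bills 0 = [] := by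
  induction bills with
  | nil => rfl
  | cons a rest ih =>
    have ha : (0:Int) < a := h a (by simp)
    simp [flat, PySem.Int.floordiv_eq_ediv_of_pos ha, PySem.Int.mod_eq_emod_of_pos ha,
      ih (fun x hx => h x (by simp [hx]))]

lemma flat_skip (a : Int) (rest : List Int) (n : Int) (h0 : 0 ≤ n) (hlt : n < a) :
    flat (a :: rest) n = flat rest n := by
  have ha : (0:Int) < a := lt_of_le_of_lt h0 hlt
  simp [flat, PySem.Int.floordiv_eq_ediv_of_pos ha, PySem.Int.mod_eq_emod_of_pos ha,
    Int.ediv_eq_zero_of_lt h0 hlt, Int.emod_eq_of_lt h0 hlt]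

lemma flat_step (a : Int) (rest : List Int) (n : Int) (ha : 0 < a) (hle : a ≤ n) :
    flat (a :: rest) n = billName a :: flat (a :: rest) (n - a) := by
  have h1 : (1:Int) ≤ n / a := by
    rw [Int.le_ediv_iff_mul_le ha]; omega
  have hdiv : (n - a) / a = n / a - 1 := by
    have h := Int.add_mul_ediv_right n (-1) (show a ≠ 0 by omega)
    have heq : n + -1 * a = n - a := by ring
    rw [heq] at h; omega
  have hmod : (n - a) % a = n % a := Int.sub_emod_right n a
  have hrep : (n / a).toNat = ((n - a) / a).toNat + 1 := by omega
  simp only [flat, PySem.Int.floordiv_eq_ediv_of_pos ha, PySem.Int.mod_eq_emod_of_pos ha,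
    hdiv, hmod, hrep, List.replicate_succ]
  simp

-- first-fit unrolling: if `a` is the first denomination ≤ n, the greedy flat list starts with it
lemma flat_firstfit : ∀ (bills : List Int) (n a : Int), 0 ≤ n → (∀ x ∈ bills, (0:Int) < x) →
    bills.find? (fun x => decide (x ≤ n)) = some a →
    flat bills n = billName a :: flat bills (n - a) := by
  intro bills
  induction bills with
  | nil => intro n a _ _ hf; simp at hf
  | cons b rest ih =>
    intro n a h0 hpos hf
    by_cases hb : b ≤ n
    · have : a = b := by
        rw [List.find?_cons_of_pos (by simpa using hb)] at hf
        simpa using hf.symm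
      subst this
      exact flat_step a rest n (hpos a (by simp)) hb
    · push_neg at hb
      rw [List.find?_cons_of_neg (by simpa using not_le.mpr hb)] at hf
      have hle : a ≤ n := by simpa using List.find?_some hf
      have hpa : 0 < a := hpos a (List.mem_cons_of_mem _ (List.mem_of_find?_eq_some hf))
      rw [flat_skip b rest n h0 hb,
        ih n a h0 (fun x hx => hpos x (by simp [hx])) hf,
        flat_skip b rest (n - a) (by omega) (by omega)]

lemma bLoop_some {n a : Int} (hpos : 0 < n)
    (hf : BILLS.find? (fun x => decide (x ≤ n)) = some a) :
    bLoop n = billName a :: bLoop (n - a) := by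
  rw [bLoop]
  simp only [hpos, dite_true]
  split
  · next amount heq => rw [hf] at heq; cases heq; rfl
  · next heq => rw [hf] at heq; cases heq

lemma bLoop_eq_flat (n : Int) (h0 : 0 ≤ n) : bLoop n = flat BILLS n := by
  induction hk : n.toNat using Nat.strong_induction_on generalizing n with
  | _ k ih =>
    by_cases hpos : 0 < n
    · have hone : (1:Int) ∈ BILLS := by decide
      cases hf : BILLS.find? (fun a => decide (a ≤ n)) with
      | none =>
        exfalso
        have := List.find?_eq_none.mp hf 1 hone
        simp at this; omega
      | some a =>
        have hle : a ≤ n := by simpa using List.find?_some hf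
        have hpa : 0 < a := bills_pos a (List.mem_of_find?_eq_some hf)
        rw [bLoop_some hpos hf, flat_firstfit BILLS n a h0 bills_pos hf]
        congr 1
        exact ih (n - a).toNat (by omega) (n - a) (by omega) rfl
    · have hn : n = 0 := by omega
      subst hn
      rw [bLoop, flat_zero BILLS bills_pos]
      simp

-- the group strings A appends: each nonzero count contributes one pre-joined block
def groups : List Int → Int → List String
  | [], _ => []
  | a :: rest, n =>
      (if 0 < PySem.Int.floordiv n a
        then [PySem.Str.join "," (List.replicate (PySem.Int.floordiv n a).toNat (billName a))]
        else [])
      ++ groups rest (PySem.Int.mod n a)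

lemma groups_zero (bills : List Int) (h : ∀ a ∈ bills, (0:Int) < a) : groups bills 0 = [] := by
  induction bills with
  | nil => rfl
  | cons a rest ih =>
    have ha : (0:Int) < a := h a (by simp)
    simp [groups, PySem.Int.floordiv_eq_ediv_of_pos ha, PySem.Int.mod_eq_emod_of_pos ha,
      ih (fun x hx => h x (by simp [hx]))]

lemma aLoop_eq_groups : ∀ (bills : List Int) (n : Int) (res : List String), 0 ≤ n →
    (∀ a ∈ bills, (0:Int) < a) → aLoop bills n res = res ++ groups bills n := by
  intro bills
  induction bills with
  | nil => intro n res _ _; simp [aLoop, groups]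
  | cons a rest ih =>
    intro n res h0 hpos
    have ha : (0:Int) < a := hpos a (by simp)
    have hrest : ∀ x ∈ rest, (0:Int) < x := fun x hx => hpos x (by simp [hx])
    by_cases hz : n = 0
    · subst hz
      rw [groups_zero _ hpos]; simp [aLoop]
    · rw [aLoop]
      simp only [hz, if_false]
      by_cases hgt : a > n
      · have hd0 : PySem.Int.floordiv n a = 0 := by
          rw [PySem.Int.floordiv_eq_ediv_of_pos ha]; exact Int.ediv_eq_zero_of_lt h0 hgt
        have hm : PySem.Int.mod n a = n := by
          rw [PySem.Int.mod_eq_emod_of_pos ha]; exact Int.emod_eq_of_lt h0 hgt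
        rw [if_pos hgt, ih n res h0 hrest]
        simp [groups, hd0, hm]
      · push_neg at hgt
        rw [if_neg (by omega)]
        have hc : 0 < PySem.Int.floordiv n a := by
          rw [PySem.Int.floordiv_eq_ediv_of_pos ha]
          have : (1:Int) ≤ n / a := by rw [Int.le_ediv_iff_mul_le ha]; omega
          omega
        have hm0 : 0 ≤ PySem.Int.mod n a := by
          rw [PySem.Int.mod_eq_emod_of_pos ha]; exact Int.emod_nonneg n (by omega)
        simp only [hc, if_pos]
        by_cases hz' : PySem.Int.mod n a = 0
        · rw [if_pos hz']
          simp [groups, hc, hz', groups_zero rest hrest]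
        · rw [if_neg hz', ih _ _ hm0 hrest]
          simp [groups, hc]

-- joining with a pre-joined first block flattens (Chars level)
lemma join_append_nonempty (sep : List Char) :
    ∀ (F L : List (List Char)), F ≠ [] → L ≠ [] →
    PySem.Chars.join sep (F ++ L) = PySem.Chars.join sep F ++ sep ++ PySem.Chars.join sep L := by
  intro F
  induction F with
  | nil => intro L h _; exact absurd rfl h
  | cons f F' ih =>
    intro L _ hL
    cases F' with
    | nil =>
      cases L with
      | nil => exact absurd rfl hL
      | cons l L' =>
        simp only [List.singleton_append, PySem.Chars.join_cons_cons, PySem.Chars.join_singleton]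
    | cons f' F'' =>
      have h1 : ((f' :: F'') ++ L) ≠ [] := by simp
      simp only [List.cons_append, PySem.Chars.join_cons_cons]
      have h2 := ih L (by simp) hL
      simp only [List.cons_append] at h2
      rw [h2]
      simp [List.append_assoc]

lemma groups_nil_iff : ∀ (bills : List Int) (n : Int), 0 ≤ n →
    (∀ a ∈ bills, (0:Int) < a) → (groups bills n = [] ↔ flat bills n = []) := by
  intro bills
  induction bills with
  | nil => intro n _ _; simp [groups, flat]
  | cons a rest ih =>
    intro n h0 hpos
    have ha : (0:Int) < a := hpos a (by simp)
    have hrest : ∀ x ∈ rest, (0:Int) < x := fun x hx => hpos x (List.mem_cons_of_mem a hx)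
    have hm0 : 0 ≤ PySem.Int.mod n a := by
      rw [PySem.Int.mod_eq_emod_of_pos ha]; exact Int.emod_nonneg n (by omega)
    have hd0 : 0 ≤ PySem.Int.floordiv n a := by
      rw [PySem.Int.floordiv_eq_ediv_of_pos ha]; exact Int.ediv_nonneg h0 (by omega)
    by_cases hc : 0 < PySem.Int.floordiv n a
    · constructor
      · intro h; exfalso; simp [groups, hc] at h
      · intro h; exfalso
        simp only [flat, List.append_eq_nil_iff, List.replicate_eq_nil_iff] at h
        omega
    · have hd : PySem.Int.floordiv n a = 0 := by omega
      simp only [groups, flat, hd, if_neg hc, Int.toNat_zero, List.replicate_zero,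
        List.nil_append]
      exact ih _ hm0 hrest

lemma join_groups_eq_join_flat (bills : List Int) (n : Int) (h0 : 0 ≤ n)
    (hpos : ∀ a ∈ bills, (0:Int) < a) :
    PySem.Str.join "," (groups bills n) = PySem.Str.join "," (flat bills n) := by
  suffices h : ∀ bills n, 0 ≤ n → (∀ a ∈ bills, (0:Int) < a) →
      PySem.Chars.join ",".toList ((groups bills n).map String.toList)
        = PySem.Chars.join ",".toList ((flat bills n).map String.toList) by
    have := h bills n h0 hpos
    have h2 : (PySem.Str.join "," (groups bills n)).toList
        = (PySem.Str.join "," (flat bills n)).toList := by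
      rw [PySem.Str.toList_join, PySem.Str.toList_join]; exact this
    exact String.toList_injective h2
  clear h0 hpos n bills
  intro bills
  induction bills with
  | nil => intro n _ _; rfl
  | cons a rest ih =>
    intro n h0 hpos
    have ha : (0:Int) < a := hpos a (by simp)
    have hrest : ∀ x ∈ rest, (0:Int) < x := fun x hx => hpos x (by simp [hx])
    have hm0 : 0 ≤ PySem.Int.mod n a := by
      rw [PySem.Int.mod_eq_emod_of_pos ha]; exact Int.emod_nonneg n (by omega)
    have hd0 : 0 ≤ PySem.Int.floordiv n a := by
      rw [PySem.Int.floordiv_eq_ediv_of_pos ha]; exact Int.ediv_nonneg h0 (by omega)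
    simp only [groups, flat]
    by_cases hc : 0 < PySem.Int.floordiv n a
    · set c := (PySem.Int.floordiv n a).toNat with hcdef
      have hcpos : c ≠ 0 := by omega
      by_cases hrnil : flat rest (PySem.Int.mod n a) = []
      · have hgnil : groups rest (PySem.Int.mod n a) = [] :=
          (groups_nil_iff rest _ hm0 hrest).mpr hrnil
        simp only [hc, if_pos, hrnil, hgnil, List.append_nil, List.map_cons, List.map_nil,
          PySem.Chars.join_singleton, PySem.Str.toList_join, List.map_replicate]
      · have hgnnil : groups rest (PySem.Int.mod n a) ≠ [] := by
          intro hx; exact hrnil ((groups_nil_iff rest _ hm0 hrest).mp hx)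
        simp only [hc, if_pos, List.singleton_append, List.map_cons, List.map_append,
          List.map_replicate]
        rw [← List.singleton_append]
        rw [join_append_nonempty _ _ _ (by simp) (by simpa using hgnnil)]
        rw [join_append_nonempty _ _ _ (by simpa using hcpos) (by simpa using hrnil)]
        rw [PySem.Chars.join_singleton, PySem.Str.toList_join, List.map_replicate]
        rw [ih _ hm0 hrest]
    · have hd : PySem.Int.floordiv n a = 0 := by omega
      simp only [hd, List.replicate, Int.toNat_zero, if_neg hc]
      simpa using ih (PySem.Int.mod n a) hm0 hrest

-- ===== VERDICT (by name: the statement is the Claim_ definition above) =====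
theorem write_number_spec : Claim_equal_write_number := by
  intro number _
  unfold Spec_write_number write_number write_number_alt
  by_cases hneg : number < 0
  · simp [hneg]
  · by_cases hz : number = 0
    · simp [hz]
    · have h0 : 0 ≤ number := by omega
      simp only [if_neg hneg, if_neg hz]
      rw [aLoop_eq_groups BILLS number [] h0 bills_pos, List.nil_append,
        join_groups_eq_join_flat BILLS number h0 bills_pos,
        bLoop_eq_flat number h0]
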